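-- pv_equiv track=rewrite | github.com/pirondibr/repediu-seo-relatorios-2026 | parse_semrush.py | parse_rows
-- ===== SOURCE A (Python) =====
-- def parse_rows(cells):
--     """Convert flat cell list into rows using URL (starts with repediu) as row terminator."""
--     rows = []
--     current = []
--     for c in cells:
--         current.append(c)
--         if c.startswith("repediu.com.br") or c == "repediu.com.br/":
--             rows.append(current)
--             current = []
--     # Discard trailing leftovers (partial row)
--     return rows
-- ===== SOURCE B (Python) =====
-- def parse_rows(cells):
--     """Convert flat cell list into rows using URL (starts with repediu) as row terminator."""
--     bounds = [i for i, c in enumerate(cells) if c.startswith("repediu.com.br")]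
--     rows = []
--     prev = 0
--     for i in bounds:
--         rows.append(cells[prev:i + 1])
--         prev = i + 1
--     return rows
-- ===== Notes on version B (the rewrite author's own statement) =====
-- stated objective: alternative
-- what changed: Replaces the single accumulate-and-flush loop with two passes: first collect all terminator indices via enumerate, then slice the cell list between consecutive boundaries; the redundant '== repediu.com.br/' test (already covered by startswith) is dropped.
import Mathlib
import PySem

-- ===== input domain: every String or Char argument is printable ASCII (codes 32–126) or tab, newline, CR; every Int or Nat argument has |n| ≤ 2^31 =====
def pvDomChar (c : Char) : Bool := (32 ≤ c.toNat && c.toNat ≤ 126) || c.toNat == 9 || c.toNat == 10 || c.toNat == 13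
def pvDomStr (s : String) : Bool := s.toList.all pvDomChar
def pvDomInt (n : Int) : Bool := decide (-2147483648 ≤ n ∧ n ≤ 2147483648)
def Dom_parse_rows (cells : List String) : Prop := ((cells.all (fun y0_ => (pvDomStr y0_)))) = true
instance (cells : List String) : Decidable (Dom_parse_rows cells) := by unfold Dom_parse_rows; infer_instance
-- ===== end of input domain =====

-- B replaces A's accumulate-and-flush loop by two passes (collect terminator indices, then slice between boundaries); equivalence proved on all inputs.

-- ===== PORT A =====
def parse_rows (cells : List String) : List (List String) :=
  (cells.foldl
    (fun (st : List (List String) × List String) c =>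
      let current := st.2 ++ [c]
      if PySem.Str.startswith c "repediu.com.br" || c == "repediu.com.br/" then
        (st.1 ++ [current], [])
      else
        (st.1, current))
    ([], [])).1

-- ===== PORT B =====
def parse_rows_alt (cells : List String) : List (List String) :=
  let bounds := ((PySem.List.enumerate cells 0).filter
      (fun p => PySem.Str.startswith p.2 "repediu.com.br")).map Prod.fst
  (bounds.foldl
    (fun (st : List (List String) × Int) i =>
      (st.1 ++ [PySem.List.slice cells (some st.2) (some (i + 1))], i + 1))
    ([], 0)).1

-- ===== PRECONDITION & SPEC =====
def Spec_parse_rows (cells : List String) (out : List (List String)) : Prop := out = parse_rows_alt cells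
instance (cells : List String) (out : List (List String)) : Decidable (Spec_parse_rows cells out) := by unfold Spec_parse_rows; infer_instance

-- ===== CLAIM (what is proved, stated in full; the proofs are below) =====
def Claim_equal_parse_rows : Prop := ∀ (cells : List String), Dom_parse_rows cells → Spec_parse_rows cells (parse_rows cells)

-- ===== LEMMAS AND PROOFS =====

-- common recursive characterisation: rows emitted with pending prefix `cur`
def goRows (cur : List String) : List String → List (List String)
  | [] => []
  | c :: rest =>
      if PySem.Str.startswith c "repediu.com.br" then (cur ++ [c]) :: goRows [] rest
      else goRows (cur ++ [c]) rest

-- A's extra equality test never fires when the startswith test is false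
lemma eq_lit_false (c : String) (h : PySem.Str.startswith c "repediu.com.br" = false) :
    (c == "repediu.com.br/") = false := by
  cases hh : c == "repediu.com.br/" with
  | false => rfl
  | true =>
      have : c = "repediu.com.br/" := eq_of_beq hh
      subst this
      exact absurd h (by decide)

lemma foldA (cells : List String) :
    ∀ (acc : List (List String)) (cur : List String),
      (cells.foldl
        (fun (st : List (List String) × List String) c =>
          let current := st.2 ++ [c]
          if PySem.Str.startswith c "repediu.com.br" || c == "repediu.com.br/" then
            (st.1 ++ [current], [])
          else
            (st.1, current))
        (acc, cur)).1 = acc ++ goRows cur cells := by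
  induction cells with
  | nil => intro acc cur; simp [goRows]
  | cons c rest ih =>
      intro acc cur
      simp only [List.foldl_cons]
      by_cases h : PySem.Str.startswith c "repediu.com.br" = true
      · simp only [h, Bool.true_or, if_true]
        rw [ih]
        simp only [goRows, h, if_true]
        simp
      · simp only [Bool.not_eq_true] at h
        simp only [h, eq_lit_false c h, Bool.false_or, Bool.false_eq_true, if_false]
        rw [ih]
        simp only [goRows, h, Bool.false_eq_true, if_false]

lemma foldB (full : List String) :
    ∀ (rest : List String) (n prev : Nat) (cur : List String) (acc : List (List String)),
      prev ≤ n → full.drop prev = cur ++ rest → cur.length = n - prev →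
      ((((PySem.List.enumerate rest (n : Int)).filter
            (fun p => PySem.Str.startswith p.2 "repediu.com.br")).map Prod.fst).foldl
        (fun (st : List (List String) × Int) i =>
          (st.1 ++ [PySem.List.slice full (some st.2) (some (i + 1))], i + 1))
        (acc, (prev : Nat))).1 = acc ++ goRows cur rest := by
  intro rest
  induction rest with
  | nil => intro n prev cur acc _ _ _; simp [PySem.List.enumerate, goRows]
  | cons c rest ih =>
      intro n prev cur acc hle hdrop hlen
      rw [PySem.List.enumerate_cons]
      by_cases h : PySem.Str.startswith c "repediu.com.br" = true
      · simp only [List.filter_cons, h, if_true, List.map_cons,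
          List.foldl_cons]
        have hcast : ((n : Int) + 1) = ((n + 1 : Nat) : Int) := by push_cast; ring
        have hslice : PySem.List.slice full (some ((prev : Nat) : Int)) (some ((n : Int) + 1))
            = cur ++ [c] := by
          rw [hcast, PySem.List.slice_natCast, hdrop]
          have h1 : n + 1 - prev = cur.length + 1 := by omega
          rw [h1]
          simp [List.take_append]
        rw [hslice, hcast]
        have hdrop' : full.drop (n + 1) = [] ++ rest := by
          have h1 : full.drop (n + 1) = (full.drop prev).drop (n + 1 - prev) := by
            rw [List.drop_drop]; congr 1; omega
          have h2 : n + 1 - prev = cur.length + 1 := by omega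
          rw [h1, hdrop, h2]
          simp [List.drop_append]
        rw [ih (n + 1) (n + 1) [] (acc ++ [cur ++ [c]]) (le_refl _) hdrop' (by simp)]
        simp only [goRows, h, if_true]
        simp
      · simp only [Bool.not_eq_true] at h
        simp only [List.filter_cons, h, Bool.false_eq_true, if_false]
        have hdrop' : full.drop prev = (cur ++ [c]) ++ rest := by
          rw [hdrop]; simp
        rw [show ((n : Int) + 1) = ((n + 1 : Nat) : Int) by push_cast; ring]
        rw [ih (n + 1) prev (cur ++ [c]) acc (by omega) hdrop' (by simp; omega)]
        simp only [goRows, h, Bool.false_eq_true, if_false]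

-- ===== VERDICT (by name: the statement is the Claim_ definition above) =====
theorem parse_rows_spec : Claim_equal_parse_rows := by
  intro cells _
  show parse_rows cells = parse_rows_alt cells
  have ha := foldA cells [] []
  have hb := foldB cells cells 0 0 [] [] (le_refl 0) (by simp) (by simp)
  simp only [parse_rows, parse_rows_alt]
  rw [ha]
  simpa using hb.symm
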